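-- pv_equiv track=rewrite | github.com/artemis64/aoc | 2021/advent3b.py | split_array_co2
-- ===== SOURCE A (Python) =====
-- def split_array_co2(position, data):
-- 	zeros = []
-- 	ones = []
-- 	for number in data:
-- 		if number[position] == '1':
-- 			ones.append(number)
-- 		else:
-- 			zeros.append(number)
-- 	if len(zeros) <= len(ones):
-- 		return zeros
-- 	else:
-- 		return ones
-- ===== SOURCE B (Python) =====
-- def split_array_co2(position, data):
--     ones = sum(1 for n in data if n[position] == '1')
--     keep_ones = len(data) - ones > ones
--     return [n for n in data if (n[position] == '1') == keep_ones]
-- ===== Notes on version B (the rewrite author's own statement) =====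
-- stated objective: alternative
-- what changed: Replaces the dual-partition (building both zeros and ones lists, returning one) by a counting pass that decides the target bit followed by a single order-preserving filter; the discarded group is never built.
import Mathlib
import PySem

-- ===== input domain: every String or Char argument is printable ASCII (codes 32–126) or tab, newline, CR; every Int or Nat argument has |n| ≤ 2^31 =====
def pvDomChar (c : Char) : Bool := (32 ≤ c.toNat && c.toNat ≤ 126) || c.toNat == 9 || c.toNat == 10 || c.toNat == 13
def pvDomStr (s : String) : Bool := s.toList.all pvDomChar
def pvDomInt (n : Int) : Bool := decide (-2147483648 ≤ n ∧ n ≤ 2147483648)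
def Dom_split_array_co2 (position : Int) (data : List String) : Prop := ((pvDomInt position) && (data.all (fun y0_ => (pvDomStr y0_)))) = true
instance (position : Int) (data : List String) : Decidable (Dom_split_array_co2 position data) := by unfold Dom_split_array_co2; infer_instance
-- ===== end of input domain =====

-- B replaces A's dual-partition by a counting pass that decides the target bit, then one
-- order-preserving filter (objective: alternative decomposition; the discarded group is never built).

-- ===== PORT A =====
def split_array_co2 (position : Int) (data : List String) : List String :=
  let st := data.foldl
    (fun (acc : List String × List String) number =>
      if PySem.Str.pyGet? number position = some '1' then (acc.1, acc.2 ++ [number])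
      else (acc.1 ++ [number], acc.2))
    ([], [])
  if st.1.length ≤ st.2.length then st.1 else st.2

-- ===== PORT B =====
def split_array_co2_alt (position : Int) (data : List String) : List String :=
  let ones : Nat := data.countP (fun n => PySem.Str.pyGet? n position == some '1')
  let keep_ones : Bool := data.length - ones > ones
  data.filter (fun n => (PySem.Str.pyGet? n position == some '1') == keep_ones)

-- ===== PRECONDITION & SPEC =====
-- Pre_ excludes exactly the inputs where Python A raises IndexError: position out of range
-- for some string in data (B's Python raises there as well).
def Pre_split_array_co2 (position : Int) (data : List String) : Prop :=
  ∀ s ∈ data, PySem.Raise.InRange s.toList.length position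
instance (position : Int) (data : List String) : Decidable (Pre_split_array_co2 position data) := by unfold Pre_split_array_co2; infer_instance
def pvWitness_split_array_co2 : Int × List String := (1, ["10", "01", "11"])
def Spec_split_array_co2 (position : Int) (data : List String) (out : List String) : Prop := out = split_array_co2_alt position data
instance (position : Int) (data : List String) (out : List String) : Decidable (Spec_split_array_co2 position data out) := by unfold Spec_split_array_co2; infer_instance

-- ===== CLAIM (what is proved, stated in full; the proofs are below) =====
def Claim_equal_split_array_co2 : Prop := ∀ (position : Int) (data : List String), Dom_split_array_co2 position data → Pre_split_array_co2 position data → Spec_split_array_co2 position data (split_array_co2 position data)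

-- ===== LEMMAS AND PROOFS =====

-- A's fold appends each element to exactly one of the two accumulators, in order.
theorem pv_foldA (p : String → Bool) (data : List String) (z o : List String) :
    data.foldl
      (fun (acc : List String × List String) number =>
        if p number = true then (acc.1, acc.2 ++ [number])
        else (acc.1 ++ [number], acc.2)) (z, o)
    = (z ++ data.filter (fun n => !p n), o ++ data.filter p) := by
  induction data generalizing z o with
  | nil => simp
  | cons x xs ih =>
    by_cases hx : p x = true <;> simp [List.foldl_cons, hx, ih]

-- The target-bit decision: returning the not-≤-longer partition equals filtering by the decided bit.
theorem pv_decide (p : String → Bool) (data : List String) :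
    (if (data.filter (fun n => !p n)).length ≤ (data.filter p).length
      then data.filter (fun n => !p n) else data.filter p)
    = data.filter (fun n => p n == decide (data.length - data.countP p > data.countP p)) := by
  have hlen := List.length_eq_length_filter_add (l := data) (f := p)
  by_cases hk : (data.filter fun n => !p n).length ≤ (data.filter p).length
  · rw [if_pos hk]
    have hd : decide (data.length - data.countP p > data.countP p) = false := by
      simp only [decide_eq_false_iff_not, List.countP_eq_length_filter]
      omega
    rw [hd]
    refine (List.filter_congr ?_).symm
    intro x _
    simp
  · rw [if_neg hk]
    have hd : decide (data.length - data.countP p > data.countP p) = true := by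
      simp only [decide_eq_true_eq, List.countP_eq_length_filter]
      omega
    rw [hd]
    refine (List.filter_congr ?_).symm
    intro x _
    simp

theorem pv_main (position : Int) (data : List String) :
    split_array_co2 position data = split_array_co2_alt position data := by
  unfold split_array_co2 split_array_co2_alt
  have hfold := pv_foldA (fun n => PySem.Str.pyGet? n position == some '1') data [] []
  simp only [beq_iff_eq] at hfold
  simp only [hfold, List.nil_append]
  exact pv_decide (fun n => PySem.Str.pyGet? n position == some '1') data

-- ===== VERDICT (by name: the statement is the Claim_ definition above) =====
theorem split_array_co2_spec : Claim_equal_split_array_co2 := by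
  intro position data _ _
  exact pv_main position data
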